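-- pv_equiv track=rewrite | github.com/IFaTaK/ViraSeqAnalytics | src/aligngenome.py | correct_offset
-- ===== SOURCE A (Python) =====
-- def correct_offset(original, readed, read_len):
--     res = readed
--     res = res[:min(len(res),len(original))]
--     max_overlap = 0
--     offset = 0
--     for idx in range(read_len):
--         if original[:idx] in res and idx > max_overlap:
--             offset = res.index(original[:idx])
--             idx = max_overlap
--     res = res[offset:] + res[:offset]
--     return res
-- ===== SOURCE B (Python) =====
-- def correct_offset(original, readed, read_len):
--     res = readed[:min(len(readed), len(original))]
--     k = min(read_len - 1, len(original))
--     while k > 0: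
--         prefix = original[:k]
--         if prefix in res:
--             offset = res.index(prefix)
--             return res[offset:] + res[:offset]
--         k -= 1
--     return res
-- ===== Notes on version B (the rewrite author's own statement) =====
-- stated objective: alternative
-- what changed: A scans prefix lengths 1..read_len-1 forward, overwriting the offset at every prefix found in res so only the last hit survives; B scans lengths downward from min(read_len-1, len(original)) and returns at the first hit, bounding the loop by len(original) with an early exit.
import Mathlib
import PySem

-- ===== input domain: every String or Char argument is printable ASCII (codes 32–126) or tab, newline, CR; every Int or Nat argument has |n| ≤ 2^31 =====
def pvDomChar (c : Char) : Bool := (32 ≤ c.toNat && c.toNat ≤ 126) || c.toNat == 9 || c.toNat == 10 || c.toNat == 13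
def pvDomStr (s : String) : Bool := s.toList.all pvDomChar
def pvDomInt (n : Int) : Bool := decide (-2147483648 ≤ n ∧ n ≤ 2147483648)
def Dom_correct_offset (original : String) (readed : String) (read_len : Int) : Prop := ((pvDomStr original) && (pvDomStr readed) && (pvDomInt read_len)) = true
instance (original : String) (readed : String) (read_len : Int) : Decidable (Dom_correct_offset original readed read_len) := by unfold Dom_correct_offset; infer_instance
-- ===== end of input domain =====

-- B replaces A's forward scan over all read_len prefix lengths (where only the last hit's offset
-- survives, since every hit overwrites it) by a descending scan from min(read_len-1, len(original))
-- that returns at the first hit: same return value, different traversal with early exit.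

-- ===== PORT A =====
def correct_offset (original : String) (readed : String) (read_len : Int) : String :=
  let o := original.toList
  -- res = readed; res = res[:min(len(res), len(original))]
  let res := PySem.Chars.slice readed.toList none (some (min (readed.toList.length : Int) (o.length : Int)))
  -- for idx in range(read_len): …   state = (max_overlap, offset); the assignment
  -- 'idx = max_overlap' only rebinds the loop variable and is dead, so it is not part of the state
  let st := (PySem.List.pyRange 0 read_len 1).foldl
    (fun (st : Int × Int) (idx : Int) =>
      if PySem.Chars.isIn (PySem.Chars.slice o none (some idx)) res && decide (idx > st.1) then
        -- offset = res.index(original[:idx]) : exact as Chars.find under the 'in' guard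
        (st.1, PySem.Chars.find res (PySem.Chars.slice o none (some idx)))
      else st)
    ((0 : Int), (0 : Int))
  let offset := st.2
  String.ofList (PySem.Chars.slice res (some offset) none ++ PySem.Chars.slice res none (some offset))

-- ===== PORT B =====
-- the 'while k > 0' loop of Source B: if original[:k] in res, return the rotation, else k -= 1
def altLoop (o res : List Char) : Nat → List Char
  | 0 => res
  | k + 1 =>
    let pre := PySem.Chars.slice o none (some ((k + 1 : Nat) : Int))
    if PySem.Chars.isIn pre res then
      -- offset = res.index(prefix) : exact as Chars.find under the 'in' guard
      let offset := PySem.Chars.find res pre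
      PySem.Chars.slice res (some offset) none ++ PySem.Chars.slice res none (some offset)
    else altLoop o res k

def correct_offset_alt (original : String) (readed : String) (read_len : Int) : String :=
  let o := original.toList
  let res := PySem.Chars.slice readed.toList none (some (min (readed.toList.length : Int) (o.length : Int)))
  String.ofList (altLoop o res (min (read_len - 1) (o.length : Int)).toNat)

-- ===== PRECONDITION & SPEC =====
def Spec_correct_offset (original : String) (readed : String) (read_len : Int) (out : String) : Prop := out = correct_offset_alt original readed read_len
instance (original : String) (readed : String) (read_len : Int) (out : String) : Decidable (Spec_correct_offset original readed read_len out) := by unfold Spec_correct_offset; infer_instance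

-- ===== CLAIM (what is proved, stated in full; the proofs are below) =====
def Claim_equal_correct_offset : Prop := ∀ (original : String) (readed : String) (read_len : Int), Dom_correct_offset original readed read_len → Spec_correct_offset original readed read_len (correct_offset original readed read_len)

-- ===== LEMMAS AND PROOFS =====

-- rotation of res by offset
def pvRot (res : List Char) (off : Int) : List Char :=
  PySem.Chars.slice res (some off) none ++ PySem.Chars.slice res none (some off)

-- the first k among n, n-1, …, 1 whose prefix original[:k] occurs in res
def pvFirstK (o res : List Char) : Nat → Option Nat
  | 0 => none
  | k + 1 => if PySem.Chars.isIn (o.take (k + 1)) res then some (k + 1) else pvFirstK o res k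

def pvResult (o res : List Char) : Option Nat → List Char
  | none => res
  | some j => pvRot res (PySem.Chars.find res (o.take j))

-- A's final offset, as a function of the last hit
def pvOffset (o res : List Char) (read_len : Int) : Int :=
  match pvFirstK o res (read_len.toNat - 1) with
  | some j => PySem.Chars.find res (o.take j)
  | none => 0

theorem pvRot_zero (res : List Char) : pvRot res 0 = res := by
  have h1 := PySem.List.slice_from (xs := res) (a := 0) (by omega)
  have h2 := PySem.List.slice_to (xs := res) (b := 0) (by omega)
  simp [pvRot, PySem.Chars.slice_eq_listSlice, h1, h2]

theorem pvRot_offset (o res : List Char) (rl : Int) :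
    pvRot res (pvOffset o res rl) = pvResult o res (pvFirstK o res (rl.toNat - 1)) := by
  unfold pvOffset pvResult
  cases pvFirstK o res (rl.toNat - 1) with
  | none => exact pvRot_zero res
  | some j => rfl

theorem altLoop_eq_result (o res : List Char) (n : Nat) :
    altLoop o res n = pvResult o res (pvFirstK o res n) := by
  induction n with
  | zero => rfl
  | succ k ih =>
    simp only [altLoop, pvFirstK, PySem.Chars.slice_eq_listSlice, PySem.List.slice_to_natCast]
    by_cases h : PySem.Chars.isIn (o.take (k + 1)) res = true
    · rw [if_pos h, if_pos h]; rfl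
    · rw [if_neg h, if_neg h]; exact ih

-- the pair fold of port A keeps max_overlap = 0; it is the plain 'overwrite on hit' fold on offset
theorem foldA_pair (c : Nat → Bool) (q : Nat → Int) (l : List Nat) (off : Int) :
    l.foldl (fun (st : Int × Int) (j : Nat) =>
        if c j = true ∧ st.1 < (j : Int) then (st.1, q j) else st) ((0:Int), off)
    = (0, l.foldl (fun (off : Int) (j : Nat) =>
        if c j = true ∧ (0:Int) < (j : Int) then q j else off) off) := by
  induction l generalizing off with
  | nil => rfl
  | cons x t ih =>
    simp only [List.foldl_cons]
    by_cases h : c x = true ∧ (0:Int) < (x:Int)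
    · rw [if_pos h, if_pos h]; exact ih _
    · rw [if_neg h, if_neg h]; exact ih _

-- a fold that overwrites its accumulator at every hit returns the value of the LAST hit
theorem foldl_last_hit (P : Nat → Prop) [DecidablePred P] (q : Nat → Int) (l : List Nat) (off : Int) :
    l.foldl (fun (acc : Int) (j : Nat) => if P j then q j else acc) off
    = (match l.reverse.find? (fun j => decide (P j)) with | some j => q j | none => off) := by
  induction l using List.reverseRecOn generalizing off with
  | nil => rfl
  | append_singleton t x ih =>
    simp only [List.foldl_append, List.foldl_cons, List.foldl_nil, List.reverse_append,
      List.reverse_cons, List.reverse_nil, List.nil_append, List.cons_append, List.find?_cons]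
    by_cases h : P x
    · simp [h]
    · simp [h, ih]

-- the reversed range's first hit is pvFirstK (index 0 never fires: its test carries 'idx > 0')
theorem find?_range_reverse (o res : List Char) (n : Nat) :
    (List.range (n + 1)).reverse.find?
      (fun j => decide (PySem.Chars.isIn (o.take j) res = true ∧ (0:Int) < (j : Int)))
    = pvFirstK o res n := by
  induction n with
  | zero => simp [List.range_succ, pvFirstK]
  | succ k ih =>
    rw [List.range_succ]
    simp only [List.reverse_append, List.reverse_cons, List.reverse_nil, List.nil_append,
      List.cons_append, List.find?_cons]
    by_cases h : PySem.Chars.isIn (o.take (k + 1)) res = true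
    · have hpb : decide (PySem.Chars.isIn (o.take (k + 1)) res = true
          ∧ (0:Int) < ((k + 1 : Nat) : Int)) = true := by
        simp [h]
      simp only [hpb]
      rw [pvFirstK, if_pos h]
    · have hpb : decide (PySem.Chars.isIn (o.take (k + 1)) res = true
          ∧ (0:Int) < ((k + 1 : Nat) : Int)) = false := by
        simp [h]
      simp only [hpb]
      rw [pvFirstK, if_neg (by simp [h])]
      exact ih

theorem pyRange_nonpos (b : Int) (h : b ≤ 0) : PySem.List.pyRange 0 b = [] := by
  simp [PySem.List.pyRange]; omega

-- port A's fold computes pvOffset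
theorem offsetA_eq (o res : List Char) (read_len : Int) :
    ((PySem.List.pyRange 0 read_len 1).foldl
      (fun (st : Int × Int) (idx : Int) =>
        if PySem.Chars.isIn (PySem.Chars.slice o none (some idx)) res && decide (idx > st.1) then
          (st.1, PySem.Chars.find res (PySem.Chars.slice o none (some idx)))
        else st)
      ((0 : Int), (0 : Int))).2
    = pvOffset o res read_len := by
  rcases le_or_gt read_len 0 with hle | hpos
  · rw [pyRange_nonpos read_len hle]
    have h0 : read_len.toNat - 1 = 0 := by omega
    simp [pvOffset, h0, pvFirstK]
  · obtain ⟨m, hm⟩ : ∃ m : Nat, read_len = ((m + 1 : Nat) : Int) := ⟨read_len.toNat - 1, by omega⟩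
    subst hm
    rw [PySem.List.pyRange_zero_natCast, List.foldl_map]
    have hstep : ∀ (st : Int × Int), ∀ j ∈ List.range (m + 1),
        (fun (st : Int × Int) (j : Nat) =>
          if PySem.Chars.isIn (PySem.Chars.slice o none (some (j : Int))) res
              && decide ((j : Int) > st.1) then
            (st.1, PySem.Chars.find res (PySem.Chars.slice o none (some (j : Int))))
          else st) st j
        = (fun (st : Int × Int) (j : Nat) =>
          if PySem.Chars.isIn (o.take j) res = true ∧ st.1 < (j : Int) then
            (st.1, PySem.Chars.find res (o.take j))
          else st) st j := by
      intro st j _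
      simp only [PySem.Chars.slice_eq_listSlice, PySem.List.slice_to_natCast,
        gt_iff_lt, Bool.and_eq_true, decide_eq_true_eq]
    rw [PySem.List.foldl_congr_mem (List.range (m + 1)) _ _ _ hstep]
    rw [foldA_pair (fun j => PySem.Chars.isIn (o.take j) res)
        (fun j => PySem.Chars.find res (o.take j)) (List.range (m + 1)) 0]
    rw [foldl_last_hit (fun j => PySem.Chars.isIn (o.take j) res = true ∧ (0:Int) < (j : Int))]
    rw [find?_range_reverse]
    have h1 : ((m + 1 : Nat) : Int).toNat - 1 = m := by omega
    rw [pvOffset, h1]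

-- beyond len(original) the prefix saturates to the whole of original, so the result is unchanged
theorem result_firstK_saturate (o res : List Char) (d : Nat) :
    pvResult o res (pvFirstK o res (o.length + d)) = pvResult o res (pvFirstK o res o.length) := by
  induction d with
  | zero => rfl
  | succ d ih =>
    show pvResult o res (pvFirstK o res (o.length + d + 1)) = _
    rw [pvFirstK, List.take_of_length_le (by omega)]
    by_cases h : PySem.Chars.isIn o res = true
    · rw [if_pos h]
      cases hL : o.length with
      | zero =>
        have ho : o = [] := List.length_eq_zero_iff.mp hL
        subst ho
        simp [pvResult, pvFirstK, PySem.Chars.find_nil, pvRot_zero]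
      | succ L =>
        have hsat : o.take (L + 1) = o := by
          rw [← hL]; exact List.take_of_length_le le_rfl
        have hsat2 : o.take (L + 1 + d + 1) = o := List.take_of_length_le (by omega)
        show pvRot res (PySem.Chars.find res (o.take (L + 1 + d + 1))) = _
        rw [hsat2, pvFirstK, hsat, if_pos h]
        show _ = pvRot res (PySem.Chars.find res (o.take (L + 1)))
        rw [hsat]
    · rw [if_neg h]
      exact ih

theorem result_firstK_of_le (o res : List Char) (n : Nat) (h : o.length ≤ n) :
    pvResult o res (pvFirstK o res n) = pvResult o res (pvFirstK o res o.length) := by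
  obtain ⟨d, rfl⟩ := Nat.exists_eq_add_of_le h
  exact result_firstK_saturate o res d

-- A's index (last hit over range(read_len)) and B's start index give the same result
theorem result_indices (o res : List Char) (rl : Int) :
    pvResult o res (pvFirstK o res (rl.toNat - 1))
    = pvResult o res (pvFirstK o res (min (rl - 1) (o.length : Int)).toNat) := by
  rcases le_or_gt rl 0 with hle | hpos
  · have h1 : rl.toNat - 1 = 0 := by omega
    have h2 : (min (rl - 1) (o.length : Int)).toNat = 0 := by omega
    rw [h1, h2]
  · have h1 : rl.toNat - 1 = (rl - 1).toNat := by omega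
    have h2 : (min (rl - 1) (o.length : Int)).toNat = min (rl - 1).toNat o.length := by omega
    rw [h1, h2]
    rcases le_or_gt (rl - 1).toNat o.length with hcase | hcase
    · rw [min_eq_left hcase]
    · rw [min_eq_right (le_of_lt hcase)]
      exact result_firstK_of_le o res _ (le_of_lt hcase)

-- ===== VERDICT (by name: the statement is the Claim_ definition above) =====
theorem correct_offset_spec : Claim_equal_correct_offset := by
  intro original readed read_len _hdom
  unfold Spec_correct_offset correct_offset correct_offset_alt
  refine congrArg String.ofList ?_
  rw [offsetA_eq original.toList
      (PySem.Chars.slice readed.toList none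
        (some (min (readed.toList.length : Int) (original.toList.length : Int)))) read_len]
  rw [altLoop_eq_result]
  show pvRot _ (pvOffset _ _ read_len) = _
  rw [pvRot_offset, result_indices]
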